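-- pv_equiv track=rewrite | github.com/sec-js/ground-station | backend/handlers/entities/databasebackup.py | _split_sql_statements
-- ===== SOURCE A (Python) =====
-- from typing import Any, Dict, List
--
-- def _split_sql_statements(sql_content: str) -> List[str]:
--     """Split SQL content into statements while respecting quoted string literals."""
--     statements: List[str] = []
--     current: List[str] = []
--     in_single_quote = False
--     i = 0
--
--     while i < len(sql_content):
--         char = sql_content[i]
--
--         if char == "'":
--             # SQLite escapes single quotes in strings using doubled single quotes ('')
--             if in_single_quote and i + 1 < len(sql_content) and sql_content[i + 1] == "'":
--                 current.append("''")
--                 i += 2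
--                 continue
--
--             in_single_quote = not in_single_quote
--             current.append(char)
--             i += 1
--             continue
--
--         if char == ";" and not in_single_quote:
--             statement = "".join(current).strip()
--             if statement:
--                 statements.append(statement)
--             current = []
--             i += 1
--             continue
--
--         current.append(char)
--         i += 1
--
--     trailing = "".join(current).strip()
--     if trailing:
--         statements.append(trailing)
--
--     return statements
-- ===== SOURCE B (Python) =====
-- from typing import List
--
-- def _split_sql_statements(sql_content: str) -> List[str]:
--     """Split SQL into statements; token scanner (whole quoted literal / run / ';') instead of a per-char state machine."""
--     n = len(sql_content)
--     statements: List[str] = []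
--     current: List[str] = []
--
--     def flush() -> None:
--         statement = "".join(current).strip()
--         if statement:
--             statements.append(statement)
--         current.clear()
--
--     i = 0
--     while i < n:
--         c = sql_content[i]
--         if c == "'":
--             # consume an entire quoted literal (doubled '' stays inside it)
--             j = i + 1
--             while j < n:
--                 if sql_content[j] == "'":
--                     if j + 1 < n and sql_content[j + 1] == "'":
--                         j += 2
--                     else:
--                         j += 1
--                         break
--                 else:
--                     j += 1
--             current.append(sql_content[i:j])
--             i = j
--         elif c == ";":
--             flush()
--             i += 1
--         else:
--             # consume a run of ordinary characters
--             j = i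
--             while j < n and sql_content[j] not in ("'", ";"):
--                 j += 1
--             current.append(sql_content[i:j])
--             i = j
--     flush()
--     return statements
-- ===== Notes on version B (the rewrite author's own statement) =====
-- stated objective: alternative
-- what changed: Replaced A's per-character loop with an in_single_quote boolean by a token scanner that consumes whole tokens (an entire quoted literal including doubled-quote escapes, a run of plain characters, or a ';') and keeps no quote-state flag across iterations.
import Mathlib
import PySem

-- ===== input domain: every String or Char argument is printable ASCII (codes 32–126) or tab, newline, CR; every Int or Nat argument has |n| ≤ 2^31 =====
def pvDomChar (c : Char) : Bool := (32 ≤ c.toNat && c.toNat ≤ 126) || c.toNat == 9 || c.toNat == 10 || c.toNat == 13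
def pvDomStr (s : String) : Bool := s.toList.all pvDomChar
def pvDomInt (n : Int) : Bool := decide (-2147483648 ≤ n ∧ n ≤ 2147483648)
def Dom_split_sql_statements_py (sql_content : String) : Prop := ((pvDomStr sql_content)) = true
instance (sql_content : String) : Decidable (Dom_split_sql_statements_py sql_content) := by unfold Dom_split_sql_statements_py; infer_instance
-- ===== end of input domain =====

-- B replaces A's per-character quote-state machine by a token scanner (whole quoted
-- literal / run of plain chars / ';'); objective: alternative (same cost, no quote flag).

-- ===== PORT A =====
-- A's index loop as recursion over the remaining characters; the lookahead
-- sql_content[i+1] (guarded by i + 1 < len) is rest.head? = some '\''.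
def pvFlushA (cur : List Char) (acc : List String) : List String :=
  let statement := PySem.Chars.strip cur
  if statement ≠ [] then acc ++ [String.ofList statement] else acc

def pvGoA : List Char → List Char → Bool → List String → List String
  | [], cur, _, acc => pvFlushA cur acc
  | c :: rest, cur, inq, acc =>
    if c = '\'' then
      if inq = true ∧ rest.head? = some '\'' then
        pvGoA rest.tail (cur ++ ['\'', '\'']) true acc
      else
        pvGoA rest (cur ++ ['\'']) (!inq) acc
    else if c = ';' ∧ inq = false then
      pvGoA rest [] false (pvFlushA cur acc)
    else
      pvGoA rest (cur ++ [c]) inq acc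
  termination_by cs => cs.length
  decreasing_by all_goals simp [List.length_tail]

def split_sql_statements_py (sql_content : String) : List String :=
  pvGoA sql_content.toList [] false []

-- ===== PORT B =====
-- Source B's inner while over a quoted literal: consume the body after the opening
-- quote (doubled '' stays inside), returning (consumed chars incl. closing quote, rest)
def pvScanLit : List Char → List Char × List Char
  | [] => ([], [])
  | '\'' :: '\'' :: rest2 => let p := pvScanLit rest2; ('\'' :: '\'' :: p.1, p.2)
  | '\'' :: rest => (['\''], rest)
  | c :: rest => let p := pvScanLit rest; (c :: p.1, p.2)

-- Source B's inner while over a run of characters that are neither quote nor semicolon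
def pvScanRun : List Char → List Char × List Char
  | [] => ([], [])
  | c :: rest =>
    if c = '\'' ∨ c = ';' then ([], c :: rest)
    else let p := pvScanRun rest; (c :: p.1, p.2)

theorem pvScanLit_len (cs : List Char) : (pvScanLit cs).2.length ≤ cs.length := by
  induction cs using pvScanLit.induct <;> simp_all [pvScanLit] <;> omega

theorem pvScanRun_len (cs : List Char) : (pvScanRun cs).2.length ≤ cs.length := by
  induction cs using pvScanRun.induct <;> simp_all [pvScanRun] <;> omega

def pvFlushB (cur : List Char) (acc : List String) : List String :=
  let statement := PySem.Chars.strip cur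
  if statement ≠ [] then acc ++ [String.ofList statement] else acc

def pvGoB : List Char → List Char → List String → List String
  | [], cur, acc => pvFlushB cur acc
  | c :: rest, cur, acc =>
    if c = '\'' then
      pvGoB (pvScanLit rest).2 (cur ++ '\'' :: (pvScanLit rest).1) acc
    else if c = ';' then
      pvGoB rest [] (pvFlushB cur acc)
    else
      pvGoB (pvScanRun rest).2 (cur ++ c :: (pvScanRun rest).1) acc
  termination_by cs => cs.length
  decreasing_by
  · have := pvScanLit_len rest; simp; omega
  · simp
  · have := pvScanRun_len rest; simp; omega

def split_sql_statements_py_alt (sql_content : String) : List String :=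
  pvGoB sql_content.toList [] []

-- ===== PRECONDITION & SPEC =====
def Spec_split_sql_statements_py (sql_content : String) (out : List String) : Prop := out = split_sql_statements_py_alt sql_content
instance (sql_content : String) (out : List String) : Decidable (Spec_split_sql_statements_py sql_content out) := by unfold Spec_split_sql_statements_py; infer_instance

-- ===== CLAIM (what is proved, stated in full; the proofs are below) =====
def Claim_equal_split_sql_statements_py : Prop := ∀ (sql_content : String), Dom_split_sql_statements_py sql_content → Spec_split_sql_statements_py sql_content (split_sql_statements_py sql_content)

-- ===== LEMMAS AND PROOFS =====

-- one-step unfolding lemmas for the two loops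
theorem pvGoA_nil (cur : List Char) (inq : Bool) (acc : List String) :
    pvGoA [] cur inq acc = pvFlushA cur acc := by rw [pvGoA.eq_def]

theorem pvGoA_esc (rest2 cur : List Char) (acc : List String) :
    pvGoA ('\'' :: '\'' :: rest2) cur true acc = pvGoA rest2 (cur ++ ['\'', '\'']) true acc := by
  rw [pvGoA.eq_def]; simp

theorem pvGoA_quote_false (rest cur : List Char) (acc : List String) :
    pvGoA ('\'' :: rest) cur false acc = pvGoA rest (cur ++ ['\'']) true acc := by
  rw [pvGoA.eq_def]; simp

theorem pvGoA_quote_end (cur : List Char) (acc : List String) :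
    pvGoA ['\''] cur true acc = pvGoA [] (cur ++ ['\'']) false acc := by
  rw [pvGoA.eq_def]; simp

theorem pvGoA_quote_close (d : Char) (rest cur : List Char) (acc : List String) (hd : d ≠ '\'') :
    pvGoA ('\'' :: d :: rest) cur true acc = pvGoA (d :: rest) (cur ++ ['\'']) false acc := by
  rw [pvGoA.eq_def]; simp [hd]

theorem pvGoA_semi (rest : List Char) (cur : List Char) (acc : List String) :
    pvGoA (';' :: rest) cur false acc = pvGoA rest [] false (pvFlushA cur acc) := by
  rw [pvGoA.eq_def]; simp

theorem pvGoA_other (c : Char) (rest cur : List Char) (inq : Bool) (acc : List String)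
    (hc : c ≠ '\'') (hc2 : ¬ (c = ';' ∧ inq = false)) :
    pvGoA (c :: rest) cur inq acc = pvGoA rest (cur ++ [c]) inq acc := by
  rw [pvGoA.eq_def]; simp [hc, hc2]

theorem pvGoB_nil (cur : List Char) (acc : List String) :
    pvGoB [] cur acc = pvFlushB cur acc := by rw [pvGoB.eq_def]

theorem pvGoB_quote (rest cur : List Char) (acc : List String) :
    pvGoB ('\'' :: rest) cur acc = pvGoB (pvScanLit rest).2 (cur ++ '\'' :: (pvScanLit rest).1) acc := by
  rw [pvGoB.eq_def]; simp

theorem pvGoB_semi (rest : List Char) (cur : List Char) (acc : List String) :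
    pvGoB (';' :: rest) cur acc = pvGoB rest [] (pvFlushB cur acc) := by
  rw [pvGoB.eq_def]; simp

theorem pvGoB_other (c : Char) (rest cur : List Char) (acc : List String)
    (hc : c ≠ '\'') (hc2 : c ≠ ';') :
    pvGoB (c :: rest) cur acc = pvGoB (pvScanRun rest).2 (cur ++ c :: (pvScanRun rest).1) acc := by
  rw [pvGoB.eq_def]; simp [hc, hc2]

-- inside a quoted literal, A's in-quote loop does exactly what pvScanLit collects
theorem pvGoA_quote (cs : List Char) : ∀ cur acc,
    pvGoA cs cur true acc = pvGoA (pvScanLit cs).2 (cur ++ (pvScanLit cs).1) false acc := by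
  induction cs using pvScanLit.induct with
  | case1 =>
      intro cur acc
      simp [pvScanLit, pvGoA_nil]
  | case2 rest2 ih =>
      intro cur acc
      rw [pvGoA_esc, ih]
      simp [pvScanLit]
  | case3 rest h =>
      intro cur acc
      match rest, h with
      | [], _ => rw [pvGoA_quote_end]; simp [pvScanLit]
      | d :: rest', h =>
          have hd : d ≠ '\'' := fun e => h rest' (by rw [e])
          rw [pvGoA_quote_close d rest' cur acc hd]
          simp [pvScanLit, hd]
  | case4 c rest h1 h2 ih =>
      intro cur acc
      have hc : c ≠ '\'' := fun e => h2 e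
      rw [pvGoA_other c rest cur true acc hc (by simp), ih]
      simp [pvScanLit, hc]

-- a run of plain characters is appended unchanged by A's loop out of quotes
theorem pvGoA_run (cs : List Char) : ∀ cur acc,
    pvGoA cs cur false acc = pvGoA (pvScanRun cs).2 (cur ++ (pvScanRun cs).1) false acc := by
  induction cs using pvScanRun.induct with
  | case1 => intro cur acc; simp [pvScanRun]
  | case2 c rest hq => intro cur acc; simp [pvScanRun, hq]
  | case3 c rest hq ih =>
      intro cur acc
      push_neg at hq
      rw [pvGoA_other c rest cur false acc hq.1 (by simp [hq.2]), ih]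
      simp [pvScanRun, hq]

theorem pvGoB_eq_pvGoA_aux (n : Nat) : ∀ cs : List Char, cs.length ≤ n → ∀ cur acc,
    pvGoB cs cur acc = pvGoA cs cur false acc := by
  induction n with
  | zero =>
      intro cs hlen cur acc
      have : cs = [] := List.eq_nil_of_length_eq_zero (Nat.le_zero.mp hlen)
      subst this
      rw [pvGoB_nil, pvGoA_nil]; rfl
  | succ n ih =>
      intro cs hlen cur acc
      match cs with
      | [] => rw [pvGoB_nil, pvGoA_nil]; rfl
      | c :: rest =>
        simp only [List.length_cons] at hlen
        by_cases hc : c = '\''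
        · subst hc
          rw [pvGoB_quote, pvGoA_quote_false, pvGoA_quote]
          simp only [List.append_assoc, List.singleton_append]
          exact ih _ (le_trans (pvScanLit_len rest) (by omega)) _ _
        · by_cases hs : c = ';'
          · subst hs
            rw [pvGoB_semi, pvGoA_semi, ih _ (by omega)]
            rfl
          · rw [pvGoB_other c rest cur acc hc hs, pvGoA_run (c :: rest)]
            have hscan : pvScanRun (c :: rest) = (c :: (pvScanRun rest).1, (pvScanRun rest).2) := by
              simp [pvScanRun, hc, hs]
            rw [hscan]
            exact ih _ (le_trans (pvScanRun_len rest) (by omega)) _ _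

theorem pvGoB_eq_pvGoA (cs : List Char) (cur : List Char) (acc : List String) :
    pvGoB cs cur acc = pvGoA cs cur false acc :=
  pvGoB_eq_pvGoA_aux cs.length cs le_rfl cur acc

-- ===== VERDICT (by name: the statement is the Claim_ definition above) =====
theorem split_sql_statements_py_spec : Claim_equal_split_sql_statements_py := by
  intro s _
  unfold Spec_split_sql_statements_py split_sql_statements_py split_sql_statements_py_alt
  exact (pvGoB_eq_pvGoA _ _ _).symm
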